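-- pv_equiv track=rewrite | github.com/f4t4nt/Berkeley-Crossword-Solver | complete_search.py | try_terminals
-- ===== SOURCE A (Python) =====
-- def try_terminals(nondefn, ans):
--     words = nondefn.split()
--     for i in range(len(words)):
--         used = []
--         jw, ja = i, 0
--         while jw < len(words) and ja < len(ans):
--             if words[jw][-1] == ans[ja]:
--                 used.append(words[jw][:-1] + words[jw][-1].upper())
--                 jw += 1
--                 ja += 1
--             else:
--                 break
--         if ja == len(ans):
--             return True, used
--     return False, None
-- ===== SOURCE B (Python) =====
-- def try_terminals(nondefn, ans):
--     words = nondefn.split()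
--     lasts = ''.join(w[-1] for w in words)
--     k = lasts.find(ans)
--     if k == -1:
--         return False, None
--     return True, [w[:-1] + w[-1].upper() for w in words[k:k + len(ans)]]
-- ===== Notes on version B (the rewrite author's own statement) =====
-- stated objective: faster
-- what changed: B replaces A's restart-at-every-index scan (for each start i, re-walk words matching last letters against ans) by building the string of last letters once and doing a single substring search (str.find), then slicing out the matched word span.
-- intended difference: On whitespace-only nondefn with empty ans, A returns (False, None) although the empty answer is trivially spelled; B returns (True, []), consistent with A's own (True, []) on empty ans whenever any word exists, which is the intended value. — e.g. on try_terminals("", ""): A returns (false, none), B returns (true, some [])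
import Mathlib
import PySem

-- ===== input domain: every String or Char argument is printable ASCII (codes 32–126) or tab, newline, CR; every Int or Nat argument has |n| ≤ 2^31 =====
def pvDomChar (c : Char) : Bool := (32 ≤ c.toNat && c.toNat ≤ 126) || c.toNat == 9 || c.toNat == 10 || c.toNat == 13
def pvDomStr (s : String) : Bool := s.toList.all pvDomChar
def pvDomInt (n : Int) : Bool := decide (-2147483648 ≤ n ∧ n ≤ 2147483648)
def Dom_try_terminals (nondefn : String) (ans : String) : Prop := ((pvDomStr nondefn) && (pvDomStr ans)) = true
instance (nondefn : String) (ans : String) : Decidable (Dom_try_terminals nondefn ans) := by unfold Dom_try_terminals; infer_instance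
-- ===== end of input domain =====

-- B replaces A's per-start rescan loop by one substring search of ans inside the string of last
-- letters (str.find), then materialises the matched word span once (objective: faster).

-- words[jw][-1]  (both Pythons contain this expression; words from split() are nonempty, so the default is never read)
def pvLast (w : String) : Char := PySem.List.pyGetD w.toList (-1) ' '

-- w[:-1] + w[-1].upper()  (the marking expression, literal in both Pythons)
def pvMark (w : String) : String :=
  String.mk (PySem.List.slice w.toList none (some (-1)) ++ [PySem.Chars.upperChar (PySem.List.pyGetD w.toList (-1) ' ')])

-- ===== PORT A =====
-- the inner 'while jw < len(words) and ja < len(ans)' loop of A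
def pvInnerA (words : List String) (ansL : List Char) (jw ja : Nat) (used : List String) :
    Nat × List String :=
  if h : jw < words.length ∧ ja < ansL.length then
    if pvLast words[jw] = ansL[ja] then
      pvInnerA words ansL (jw + 1) (ja + 1) (used ++ [pvMark words[jw]])
    else (ja, used)
  else (ja, used)
termination_by ansL.length - ja

-- the outer 'for i in range(len(words))' loop of A
def pvOuterA (words : List String) (ansL : List Char) : List Nat → Bool × Option (List String)
  | [] => (false, none)
  | i :: rest =>
    let r := pvInnerA words ansL i 0 []
    if r.1 = ansL.length then (true, some r.2) else pvOuterA words ansL rest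

def try_terminals (nondefn : String) (ans : String) : Bool × Option (List String) :=
  let words := PySem.Str.split₀ nondefn
  pvOuterA words ans.toList (List.range words.length)

-- ===== PORT B =====
def try_terminals_alt (nondefn : String) (ans : String) : Bool × Option (List String) :=
  let words := PySem.Str.split₀ nondefn
  let lasts := words.map pvLast                         -- ''.join(w[-1] for w in words)
  let k := PySem.Chars.find lasts ans.toList            -- lasts.find(ans)
  if k = -1 then (false, none)
  else (true, some ((PySem.List.slice words (some k) (some (k + PySem.Str.len ans))).map pvMark))

-- ===== PRECONDITION & SPEC =====
-- On whitespace-only nondefn with empty ans, A returns (False, None) although the empty answer is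
-- trivially spelled by zero consecutive words; B returns (True, []) there, consistent with A's own
-- (True, []) on empty ans whenever at least one word exists, which is the intended value.
def D_try_terminals (nondefn : String) (ans : String) : Prop :=
  PySem.Str.split₀ nondefn = [] ∧ ans = ""
instance (nondefn : String) (ans : String) : Decidable (D_try_terminals nondefn ans) := by
  unfold D_try_terminals; infer_instance

def Spec_try_terminals (nondefn : String) (ans : String) (out : Bool × Option (List String)) : Prop :=
  ¬ D_try_terminals nondefn ans → out = try_terminals_alt nondefn ans
instance (nondefn : String) (ans : String) (out : Bool × Option (List String)) :
    Decidable (Spec_try_terminals nondefn ans out) := by unfold Spec_try_terminals; infer_instance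

def pvDiffWitness_try_terminals : String × String := ("", "")
def pvDiffWitnessOut_try_terminals : (Bool × Option (List String)) × (Bool × Option (List String)) :=
  ((false, none), (true, some []))

-- ===== CLAIM (what is proved, stated in full; the proofs are below) =====
def Claim_unchanged_try_terminals : Prop := ∀ (nondefn : String) (ans : String), Dom_try_terminals nondefn ans → Spec_try_terminals nondefn ans (try_terminals nondefn ans)
def Claim_changed_try_terminals : Prop := Dom_try_terminals (pvDiffWitness_try_terminals.1) (pvDiffWitness_try_terminals.2) ∧ D_try_terminals (pvDiffWitness_try_terminals.1) (pvDiffWitness_try_terminals.2) ∧ try_terminals (pvDiffWitness_try_terminals.1) (pvDiffWitness_try_terminals.2) = pvDiffWitnessOut_try_terminals.1 ∧ try_terminals_alt (pvDiffWitness_try_terminals.1) (pvDiffWitness_try_terminals.2) = pvDiffWitnessOut_try_terminals.2 ∧ pvDiffWitnessOut_try_terminals.1 ≠ pvDiffWitnessOut_try_terminals.2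
def Claim_exact_try_terminals : Prop := ∀ (nondefn : String) (ans : String), Dom_try_terminals nondefn ans → D_try_terminals nondefn ans → try_terminals nondefn ans ≠ try_terminals_alt nondefn ans

-- ===== LEMMAS AND PROOFS =====

-- A's inner loop succeeds exactly when the remaining answer letters prefix the remaining last letters
lemma pvInnerA_succ (words : List String) (ansL : List Char) :
    ∀ jw ja used, ja ≤ ansL.length →
      ansL.drop ja <+: (words.map pvLast).drop jw →
      pvInnerA words ansL jw ja used
        = (ansL.length, used ++ ((words.drop jw).take (ansL.length - ja)).map pvMark) := by
  suffices main : ∀ n jw ja used, ansL.length - ja = n → ja ≤ ansL.length →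
      ansL.drop ja <+: (words.map pvLast).drop jw →
      pvInnerA words ansL jw ja used
        = (ansL.length, used ++ ((words.drop jw).take (ansL.length - ja)).map pvMark) by
    intro jw ja used h1 h2; exact main _ jw ja used rfl h1 h2
  intro n
  induction n with
  | zero =>
    intro jw ja used hn hle hpre
    have hja : ja = ansL.length := by omega
    rw [pvInnerA]
    simp [hja]
  | succ n ih =>
    intro jw ja used hn hle hpre
    have hja : ja < ansL.length := by omega
    rw [← List.getElem_cons_drop (as := ansL) (i := ja) hja] at hpre
    have hne : (words.map pvLast).drop jw ≠ [] := by
      intro h; rw [h] at hpre; exact (List.cons_ne_nil _ _) (List.prefix_nil.mp hpre)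
    have hjw : jw < words.length := by
      by_contra h
      exact hne (List.drop_eq_nil_of_le (by simpa using Nat.le_of_not_lt h))
    rw [← List.getElem_cons_drop (as := words.map pvLast) (i := jw) (by simpa using hjw)] at hpre
    rw [List.cons_prefix_cons] at hpre
    obtain ⟨hhead, htail⟩ := hpre
    have hhead' : pvLast words[jw] = ansL[ja] := by
      simpa using hhead.symm
    rw [pvInnerA]
    rw [dif_pos ⟨hjw, hja⟩, if_pos hhead']
    rw [ih (jw + 1) (ja + 1) (used ++ [pvMark words[jw]]) (by omega) (by omega) (by simpa using htail)]
    have htake : ansL.length - ja = (ansL.length - (ja + 1)) + 1 := by omega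
    have hdrop : List.drop jw (List.map pvMark words)
        = pvMark words[jw] :: List.drop (jw + 1) (List.map pvMark words) := by
      rw [← List.getElem_cons_drop (as := List.map pvMark words) (i := jw) (by simpa using hjw)]
      simp
    simp [htake, hdrop, List.take_succ_cons]

lemma pvInnerA_fail (words : List String) (ansL : List Char) :
    ∀ jw ja used, ja ≤ ansL.length →
      ¬ ansL.drop ja <+: (words.map pvLast).drop jw →
      (pvInnerA words ansL jw ja used).1 < ansL.length := by
  suffices main : ∀ n jw ja used, ansL.length - ja = n → ja ≤ ansL.length →
      ¬ ansL.drop ja <+: (words.map pvLast).drop jw →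
      (pvInnerA words ansL jw ja used).1 < ansL.length by
    intro jw ja used h1 h2; exact main _ jw ja used rfl h1 h2
  intro n
  induction n with
  | zero =>
    intro jw ja used hn hle hpre
    exact absurd (by simp [show ja = ansL.length by omega]) hpre
  | succ n ih =>
    intro jw ja used hn hle hpre
    have hja : ja < ansL.length := by omega
    rw [pvInnerA]
    by_cases hjw : jw < words.length
    · rw [dif_pos ⟨hjw, hja⟩]
      by_cases hhead : pvLast words[jw] = ansL[ja]
      · rw [if_pos hhead]
        refine ih (jw + 1) (ja + 1) _ (by omega) (by omega) ?_
        intro htail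
        apply hpre
        rw [← List.getElem_cons_drop (as := ansL) (i := ja) hja,
            ← List.getElem_cons_drop (as := words.map pvLast) (i := jw) (by simpa using hjw),
            List.cons_prefix_cons]
        exact ⟨by simpa using hhead.symm, htail⟩
      · rw [if_neg hhead]; exact hja
    · rw [dif_neg (by tauto)]; exact hja

lemma pvOuterA_skip (words : List String) (ansL : List Char) (l1 l2 : List Nat)
    (h : ∀ i ∈ l1, ¬ ansL <+: (words.map pvLast).drop i) :
    pvOuterA words ansL (l1 ++ l2) = pvOuterA words ansL l2 := by
  induction l1 with
  | nil => simp
  | cons i rest ih =>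
    have hfail := pvInnerA_fail words ansL i 0 [] (Nat.zero_le _)
      (by simpa using h i (List.mem_cons_self))
    rw [List.cons_append, pvOuterA]
    simp only [if_neg (Nat.ne_of_lt hfail)]
    exact ih (fun j hj => h j (List.mem_cons_of_mem _ hj))

theorem try_terminals_spec : Claim_unchanged_try_terminals := by
  intro nondefn ans _
  unfold Spec_try_terminals
  intro hD
  simp only [try_terminals, try_terminals_alt]
  set words := PySem.Str.split₀ nondefn with hw
  set ansL := ans.toList with hal
  set lasts := words.map pvLast with hl
  by_cases hk : PySem.Chars.find lasts ansL = -1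
  · rw [if_pos hk]
    have hnf : ∀ i ∈ List.range words.length, ¬ ansL <+: lasts.drop i := by
      intro i _ hpre
      have hin : PySem.Chars.isIn ansL lasts = true :=
        (PySem.Chars.exists_prefix_drop_iff_isIn ansL lasts).mp ⟨i, hpre⟩
      exact (PySem.Chars.find_eq_neg_one_iff lasts ansL).mp hk
        ((PySem.Chars.isIn_iff_infix ansL lasts).mp hin)
    have hskip := pvOuterA_skip words ansL (List.range words.length) [] hnf
    simpa [pvOuterA] using hskip
  · have hk0 : 0 ≤ PySem.Chars.find lasts ansL := by
      have := PySem.Chars.neg_one_le_find lasts ansL; omega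
    obtain ⟨hpre, hmin⟩ := PySem.Chars.find_spec hk0
    set k := (PySem.Chars.find lasts ansL).toNat with hkdef
    have hlen : lasts.length = words.length := by simp [hl]
    have hkn : k < words.length := by
      by_cases ha : ansL = []
      · have hz : PySem.Chars.find lasts ansL = 0 := by rw [ha]; exact PySem.Chars.find_nil lasts
        have hwne : words ≠ [] := by
          intro hwe
          exact hD ⟨by rw [← hw]; exact hwe, String.toList_eq_nil_iff.mp (hal ▸ ha)⟩
        have : 0 < words.length := List.length_pos_iff.mpr hwne
        omega
      · have hne : lasts.drop k ≠ [] := by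
          intro h; rw [h] at hpre; exact ha (List.prefix_nil.mp hpre)
        have := List.drop_eq_nil_iff.not.mp hne
        omega
    have hrange : List.range words.length = List.range k ++ List.range' k (words.length - k) := by
      rw [List.range_eq_range', List.range_eq_range']
      have happ := List.range'_append (s := 0) (m := k) (n := words.length - k) (step := 1)
      simp only [Nat.zero_add, Nat.one_mul] at happ
      rw [happ]
      congr 1
      omega
    rw [hrange,
      pvOuterA_skip words ansL _ _ (fun i hi hp => hmin i (List.mem_range.mp hi) hp)]
    have hsplit : words.length - k = (words.length - k - 1) + 1 := by omega
    rw [hsplit, List.range'_succ, pvOuterA]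
    have hsucc := pvInnerA_succ words ansL k 0 [] (Nat.zero_le _) (by simpa using hpre)
    have hlen2 : PySem.Str.len ans = (ansL.length : Int) := by
      rw [PySem.Str.len_eq, hal]
    have hslice : PySem.List.slice words (some (PySem.Chars.find lasts ansL))
        (some (PySem.Chars.find lasts ansL + PySem.Str.len ans)) = (words.drop k).take ansL.length := by
      have hbn : (PySem.Chars.find lasts ansL + (ansL.length : Int)).toNat
          - (PySem.Chars.find lasts ansL).toNat = ansL.length := by omega
      rw [hlen2, PySem.List.slice_toNat words hk0 (by omega), hbn, ← hkdef]
    rw [if_neg hk, hslice]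
    simp [hsucc, List.map_take, List.map_drop]

theorem try_terminals_changed : Claim_changed_try_terminals := by
  unfold Claim_changed_try_terminals; decide

theorem try_terminals_tight : Claim_exact_try_terminals := by
  intro nondefn ans _ hD
  obtain ⟨hw, ha⟩ := hD
  simp only [try_terminals, try_terminals_alt, hw, ha]
  decide
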